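-- pv_equiv track=rewrite | github.com/huytq000605/GrindLC | Array/*Make Array Empty/solution_st.py | countOperationsToEmptyArray
-- ===== SOURCE A (Python) =====
-- from typing import List
--
-- class SegmentTree:
--     def __init__(self, start, end, val):
--         self.start = start
--         self.end = end
--         self.val = val
--         self.left = None
--         self.right = None
--
--     def query(self, start, end):
--         if end < self.start or start > self.end:
--             return 0
--         if start <= self.start and self.end <= end:
--             return self.val
--         self.down()
--         return self.left.query(start, end) + self.right.query(start, end)
--
--     def update(self, start, end, val):
--         if end < self.start or start > self.end:
--             return
--         if start <= self.start and self.end <= end: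
--             self.val = val
--             return
--         self.down()
--         self.left.update(start, end, val)
--         self.right.update(start, end, val)
--         self.val = self.left.val + self.right.val
--
--     def down(self):
--         if self.start != self.end and not self.left:
--             mid = self.start + (self.end - self.start) // 2
--             self.left = SegmentTree(self.start, mid, 0)
--             self.right = SegmentTree(mid + 1, self.end, 0)
--
-- def countOperationsToEmptyArray(nums: List[int]) -> int:
--     n = len(nums)
--     nums = sorted([(num, i) for i, num in enumerate(nums)])
--
--     st = SegmentTree(0, n-1, 0)
--     for i in range(n):
--         st.update(i, i, 1)
--
--     prev = 0
--     result = 0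
--     for num, idx in nums:
--         if prev == idx:
--             result += 1
--         elif prev < idx:
--             result += st.query(prev, idx-1) + 1
--         else:
--             result += st.query(prev, n-1) + st.query(0, idx-1) + 1
--         st.update(idx, idx, 0)
--         prev = idx
--     return result
-- ===== SOURCE B (Python) =====
-- from typing import List
--
-- def countOperationsToEmptyArray(nums: List[int]) -> int:
--     n = len(nums)
--     pairs = sorted([(num, i) for i, num in enumerate(nums)])
--     res = n
--     rem = n
--     prev = 0
--     for _, idx in pairs:
--         if idx < prev:
--             res += rem
--         rem -= 1
--         prev = idx
--     return res
-- ===== Notes on version B (the rewrite author's own statement) =====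
-- stated objective: faster
-- what changed: B replaces A's segment-tree simulation of the removal rotations by the closed-form count: sort (value, index) pairs once and add, for every descent between consecutive sorted positions, the number of elements still remaining; no tree is built or queried.
import Mathlib
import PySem

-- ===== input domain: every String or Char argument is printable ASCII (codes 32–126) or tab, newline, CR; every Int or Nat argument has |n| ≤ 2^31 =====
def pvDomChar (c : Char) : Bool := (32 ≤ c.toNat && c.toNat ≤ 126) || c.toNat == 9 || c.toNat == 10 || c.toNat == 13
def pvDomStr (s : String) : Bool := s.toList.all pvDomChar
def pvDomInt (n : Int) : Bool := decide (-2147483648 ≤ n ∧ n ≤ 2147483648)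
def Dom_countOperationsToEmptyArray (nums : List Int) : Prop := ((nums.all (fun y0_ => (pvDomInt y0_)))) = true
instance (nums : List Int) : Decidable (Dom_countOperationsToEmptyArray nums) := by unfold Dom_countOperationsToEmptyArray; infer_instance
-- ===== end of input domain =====

-- B replaces A's segment-tree simulation of the rotations by the closed formula
-- n + Σ (remaining count at each descent of sorted positions); objective: faster (constant factor).

-- ===== PORT A =====
-- A's SegmentTree object: None children are `.empty`; `fuel` is a structural bound
-- making the lazy-descent recursion total (never exhausted on admitted inputs, proved below).
inductive Seg where
  | empty : Seg
  | node (s e v : Int) (l r : Seg) : Seg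

def Seg.val : Seg → Int
  | .empty => 0
  | .node _ _ v _ _ => v

-- SegmentTree.down: creates the two zero children when absent and the range is not a point
def Seg.down : Seg → Seg
  | .empty => .empty
  | .node s e v l r =>
    match l with
    | .empty =>
      if s ≠ e then
        let mid := s + PySem.Int.floordiv (e - s) 2
        .node s e v (.node s mid 0 .empty .empty) (.node (mid + 1) e 0 .empty .empty)
      else .node s e v l r
    | _ => .node s e v l r

-- SegmentTree.query
def Seg.query : Nat → Int → Int → Seg → Int
  | 0, _, _, _ => 0
  | _ + 1, _, _, .empty => 0
  | fuel + 1, qs, qe, .node s e v l r =>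
    if qe < s ∨ qs > e then 0
    else if qs ≤ s ∧ e ≤ qe then v
    else
      match Seg.down (.node s e v l r) with
      | .node _ _ _ l' r' => Seg.query fuel qs qe l' + Seg.query fuel qs qe r'
      | .empty => 0

-- SegmentTree.update
def Seg.update : Nat → Int → Int → Int → Seg → Seg
  | 0, _, _, _, t => t
  | _ + 1, _, _, _, .empty => .empty
  | fuel + 1, us, ue, w, .node s e v l r =>
    if ue < s ∨ us > e then .node s e v l r
    else if us ≤ s ∧ e ≤ ue then .node s e w l r
    else
      match Seg.down (.node s e v l r) with
      | .node s' e' _ l' r' =>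
        let l2 := Seg.update fuel us ue w l'
        let r2 := Seg.update fuel us ue w r'
        .node s' e' (l2.val + r2.val) l2 r2
      | .empty => .empty

-- the body of A's main loop (state: segment tree, prev, result)
def stepA (fuel : Nat) (n : Int) (acc : Seg × Int × Int) (p : Int × Int) : Seg × Int × Int :=
  let st := acc.1
  let prev := acc.2.1
  let result := acc.2.2
  let idx := p.2
  let result :=
    if prev = idx then result + 1
    else if prev < idx then result + (Seg.query fuel prev (idx - 1) st + 1)
    else result + (Seg.query fuel prev (n - 1) st + Seg.query fuel 0 (idx - 1) st + 1)
  (Seg.update fuel idx idx 0 st, idx, result)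

def countOperationsToEmptyArray (nums : List Int) : Int :=
  let n : Int := nums.length
  let pairs := PySem.List.sorted2 ((PySem.List.enumerate nums).map (fun p => (p.2, p.1))) Prod.fst Prod.snd false
  let fuel := nums.length + 1
  let st0 : Seg := .node 0 (n - 1) 0 .empty .empty
  let st1 := (PySem.List.pyRange 0 n 1).foldl (fun st i => Seg.update fuel i i 1 st) st0
  (pairs.foldl (stepA fuel n) (st1, 0, 0)).2.2

-- ===== PORT B =====
-- the body of B's loop (state: res, rem, prev)
def stepB (acc : Int × Int × Int) (p : Int × Int) : Int × Int × Int :=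
  ((if p.2 < acc.2.2 then acc.1 + acc.2.1 else acc.1), acc.2.1 - 1, p.2)

def countOperationsToEmptyArray_alt (nums : List Int) : Int :=
  let n : Int := nums.length
  let pairs := PySem.List.sorted2 ((PySem.List.enumerate nums).map (fun p => (p.2, p.1))) Prod.fst Prod.snd false
  (pairs.foldl stepB (n, n, 0)).1

-- ===== PRECONDITION & SPEC =====
def Spec_countOperationsToEmptyArray (nums : List Int) (out : Int) : Prop := out = countOperationsToEmptyArray_alt nums
instance (nums : List Int) (out : Int) : Decidable (Spec_countOperationsToEmptyArray nums out) := by unfold Spec_countOperationsToEmptyArray; infer_instance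

-- ===== CLAIM (what is proved, stated in full; the proofs are below) =====
def Claim_equal_countOperationsToEmptyArray : Prop := ∀ (nums : List Int), Dom_countOperationsToEmptyArray nums → Spec_countOperationsToEmptyArray nums (countOperationsToEmptyArray nums)

-- ===== LEMMAS AND PROOFS =====

-- sum of f over the integer interval [a, b]
def cnt (f : Int → Int) (a b : Int) : Int := ((PySem.List.pyRange a (b + 1) 1).map f).sum

-- indicator of the not-yet-removed positions (the second components of the remaining pairs)
def ind (l : List (Int × Int)) : Int → Int := fun j => if j ∈ l.map Prod.snd then 1 else 0

-- B's wrap-sum, as a recursion over the remaining pairs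
def bw (rem prev : Int) : List (Int × Int) → Int
  | [] => 0
  | p :: t => (if p.2 < prev then rem else 0) + bw (rem - 1) p.2 t

-- the segment-tree invariant: t covers [s, e] and stores the sums of f;
-- a childless node either is a point or covers a region where f vanishes
inductive Models (f : Int → Int) : Int → Int → Seg → Prop where
  | base (s e v : Int) (hse : s ≤ e) (hv : v = cnt f s e)
      (hz : s = e ∨ ∀ i, s ≤ i → i ≤ e → f i = 0) : Models f s e (.node s e v .empty .empty)
  | inner (s e v : Int) (l r : Seg) (hse : s < e)
      (hl : Models f s (s + PySem.Int.floordiv (e - s) 2) l)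
      (hr : Models f (s + PySem.Int.floordiv (e - s) 2 + 1) e r)
      (hv : v = cnt f s e) : Models f s e (.node s e v l r)


-- ---- arithmetic facts about cnt ----

lemma cnt_congr {f g : Int → Int} {a b : Int} (h : ∀ i, a ≤ i → i ≤ b → f i = g i) :
    cnt f a b = cnt g a b := by
  unfold cnt
  refine congrArg List.sum (List.map_congr_left ?_)
  intro i hi
  rw [PySem.List.mem_pyRange_one] at hi
  exact h i hi.1 (by omega)

lemma cnt_zero {f : Int → Int} {a b : Int} (h : ∀ i, a ≤ i → i ≤ b → f i = 0) :
    cnt f a b = 0 := by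
  rw [cnt_congr (g := fun _ => 0) h]
  simp [cnt]

lemma cnt_empty {f : Int → Int} {a b : Int} (h : b < a) : cnt f a b = 0 := by
  unfold cnt
  rw [PySem.List.pyRange_one_eq_nil (by omega)]
  rfl

lemma cnt_point (f : Int → Int) (a : Int) : cnt f a a = f a := by
  unfold cnt
  rw [PySem.List.pyRange_one_singleton]
  simp

lemma cnt_concat {f : Int → Int} {a b : Int} (m : Int) (h1 : a ≤ m + 1) (h2 : m ≤ b) :
    cnt f a b = cnt f a m + cnt f (m + 1) b := by
  unfold cnt
  rw [PySem.List.pyRange_one_append a (m + 1) (b + 1) h1 (by omega), List.map_append, List.sum_append]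

lemma cnt_split (f : Int → Int) (a b m : Int) :
    cnt f a b = cnt f a (min b m) + cnt f (max a (m + 1)) b := by
  rcases lt_or_ge m a with hma | hma
  · have h1 : cnt f a (min b m) = 0 := cnt_empty (by omega)
    have h2 : max a (m + 1) = a := by omega
    rw [h1, h2]; ring
  · rcases le_or_gt b m with hbm | hbm
    · have h1 : min b m = b := by omega
      have h2 : cnt f (max a (m + 1)) b = 0 := cnt_empty (by omega)
      rw [h1, h2]; ring
    · have h1 : min b m = m := by omega
      have h2 : max a (m + 1) = m + 1 := by omega
      rw [h1, h2]
      exact cnt_concat m (by omega) (by omega)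

lemma sum_map_add (l : List Int) (f g : Int → Int) :
    (l.map (fun i => f i + g i)).sum = (l.map f).sum + (l.map g).sum := by
  induction l with
  | nil => simp
  | cons x t ih => simp [ih]; ring

lemma cnt_add (f g : Int → Int) (a b : Int) :
    cnt (fun i => f i + g i) a b = cnt f a b + cnt g a b := by
  unfold cnt
  exact sum_map_add _ f g

-- ---- the midpoint of a segment-tree split ----

lemma mid_bounds {s e : Int} (h : s < e) :
    s ≤ s + PySem.Int.floordiv (e - s) 2 ∧ s + PySem.Int.floordiv (e - s) 2 < e := by
  rw [PySem.Int.floordiv_eq_ediv_of_pos (by omega)]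
  omega

-- ---- invariant lemmas ----

lemma Models.val_eq {f : Int → Int} {s e : Int} {t : Seg} (h : Models f s e t) :
    t.val = cnt f s e := by
  cases h <;> simp [Seg.val] <;> assumption

lemma Models.congr {f g : Int → Int} {s e : Int} {t : Seg} (h : Models f s e t)
    (hfg : ∀ i, s ≤ i → i ≤ e → f i = g i) : Models g s e t := by
  induction h with
  | base s e v hse hv hz =>
    refine Models.base s e v hse ?_ ?_
    · rw [hv]; exact cnt_congr hfg
    · rcases hz with hz | hz
      · exact Or.inl hz
      · exact Or.inr (fun i h1 h2 => (hfg i h1 h2).symm.trans (hz i h1 h2))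
  | inner s e v l r hse hl hr hv ihl ihr =>
    have hm := mid_bounds hse
    refine Models.inner s e v l r hse ?_ ?_ ?_
    · exact ihl (fun i h1 h2 => hfg i h1 (by omega))
    · exact ihr (fun i h1 h2 => hfg i (by omega) h2)
    · rw [hv]; exact cnt_congr hfg

lemma query_eq (fuel : Nat) (f : Int → Int) (qs qe : Int) :
    ∀ (s e : Int) (t : Seg), Models f s e t → (e - s).toNat < fuel →
    Seg.query fuel qs qe t = cnt f (max s qs) (min e qe) := by
  induction fuel with
  | zero => intro s e t _ hf; omega
  | succ fuel ih =>
    intro s e t h hf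
    cases h with
    | base s e v hse hv hz =>
      rw [Seg.query]
      split
      · exact (cnt_empty (by omega)).symm
      · split
        · rename_i h1 h2
          have hmax : max s qs = s := by omega
          have hmin : min e qe = e := by omega
          rw [hmax, hmin, hv]
        · rename_i h1 h2
          have hse' : s < e := by omega
          have hz' : ∀ i, s ≤ i → i ≤ e → f i = 0 := by
            rcases hz with hz | hz
            · omega
            · exact hz
          have hm := mid_bounds hse'
          rw [Seg.down]
          simp only [if_pos (show s ≠ e by omega)]
          rw [ih s _ _ (Models.base _ _ _ (by omega) (cnt_zero (fun i ha hb => hz' i ha (by omega))).symm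
                (Or.inr (fun i ha hb => hz' i ha (by omega)))) (by omega),
              ih _ e _ (Models.base _ _ _ (by omega) (cnt_zero (fun i ha hb => hz' i (by omega) hb)).symm
                (Or.inr (fun i ha hb => hz' i (by omega) hb))) (by omega)]
          rw [cnt_zero (fun i ha hb => hz' i (by omega) (by omega)),
              cnt_zero (fun i ha hb => hz' i (by omega) (by omega)),
              cnt_zero (fun i ha hb => hz' i (by omega) (by omega))]
          omega
    | inner s e v l r hse hl hr hv =>
      rw [Seg.query]
      split
      · exact (cnt_empty (by omega)).symm
      · split
        · rename_i h1 h2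
          have hmax : max s qs = s := by omega
          have hmin : min e qe = e := by omega
          rw [hmax, hmin, hv]
        · rename_i h1 h2
          have hm := mid_bounds hse
          obtain ⟨lv, ll, lr, hleq⟩ : ∃ v' l' r',
              l = Seg.node s (s + PySem.Int.floordiv (e - s) 2) v' l' r' := by
            cases hl with
            | base s' e' v' hse' hv' hz' => exact ⟨_, _, _, rfl⟩
            | inner s' e' v' l' r' hse' hl' hr' hv' => exact ⟨_, _, _, rfl⟩
          subst hleq
          simp only [Seg.down]
          rw [ih _ _ _ hl (by omega), ih _ _ _ hr (by omega)]
          rw [cnt_split f (max s qs) (min e qe) (s + PySem.Int.floordiv (e - s) 2)]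
          have e1 : min (min e qe) (s + PySem.Int.floordiv (e - s) 2)
              = min (s + PySem.Int.floordiv (e - s) 2) qe := by omega
          have e2 : max (max s qs) (s + PySem.Int.floordiv (e - s) 2 + 1)
              = max (s + PySem.Int.floordiv (e - s) 2 + 1) qs := by omega
          rw [e1, e2]


lemma update_models (fuel : Nat) (f : Int → Int) (i w : Int) :
    ∀ (s e : Int) (t : Seg), Models f s e t → (e - s).toNat < fuel →
    Models (fun j => if j = i then w else f j) s e (Seg.update fuel i i w t) := by
  induction fuel with
  | zero => intro s e t _ hf; omega
  | succ fuel ih =>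
    intro s e t h hf
    cases h with
    | base s e v hse hv hz =>
      rw [Seg.update]
      split
      · rename_i h1
        exact (Models.base s e v hse hv hz).congr
          (fun j hj1 hj2 => (if_neg (show ¬ j = i by omega)).symm)
      · split
        · rename_i h1 h2
          have h3 : cnt (fun j => if j = i then w else f j) s e = w := by
            have he : e = s := by omega
            subst he
            rw [cnt_point]
            rw [if_pos (by omega)]
          exact Models.base s e w hse h3.symm (Or.inl (by omega))
        · rename_i h1 h2
          have hse' : s < e := by omega
          have hz' : ∀ j, s ≤ j → j ≤ e → f j = 0 := by
            rcases hz with hz | hz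
            · omega
            · exact hz
          have hm := mid_bounds hse'
          simp only [Seg.down, if_pos (show s ≠ e by omega)]
          have hcl : Models f s (s + PySem.Int.floordiv (e - s) 2)
              (.node s (s + PySem.Int.floordiv (e - s) 2) 0 .empty .empty) :=
            Models.base s (s + PySem.Int.floordiv (e - s) 2) 0 (by omega)
              (cnt_zero (fun j ha hb => hz' j ha (by omega))).symm
              (Or.inr (fun j ha hb => hz' j ha (by omega)))
          have hcr : Models f (s + PySem.Int.floordiv (e - s) 2 + 1) e
              (.node (s + PySem.Int.floordiv (e - s) 2 + 1) e 0 .empty .empty) :=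
            Models.base (s + PySem.Int.floordiv (e - s) 2 + 1) e 0 (by omega)
              (cnt_zero (fun j ha hb => hz' j (by omega) hb)).symm
              (Or.inr (fun j ha hb => hz' j (by omega) hb))
          have hl2 := ih s _ _ hcl (by omega)
          have hr2 := ih _ e _ hcr (by omega)
          refine Models.inner s e _ _ _ hse' hl2 hr2 ?_
          rw [hl2.val_eq, hr2.val_eq]
          exact (cnt_concat (s + PySem.Int.floordiv (e - s) 2) (by omega) (by omega)).symm
    | inner s e v l r hse hl hr hv =>
      rw [Seg.update]
      split
      · rename_i h1
        exact (Models.inner s e v l r hse hl hr hv).congr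
          (fun j hj1 hj2 => (if_neg (show ¬ j = i by omega)).symm)
      · split
        · rename_i h1 h2
          exact False.elim (by omega)
        · rename_i h1 h2
          have hm := mid_bounds hse
          obtain ⟨lv, ll, lr, hleq⟩ : ∃ v' l' r',
              l = Seg.node s (s + PySem.Int.floordiv (e - s) 2) v' l' r' := by
            cases hl with
            | base s' e' v' hse' hv' hz2 => exact ⟨_, _, _, rfl⟩
            | inner s' e' v' l' r' hse' hl' hr' hv' => exact ⟨_, _, _, rfl⟩
          subst hleq
          simp only [Seg.down]
          have hl2 := ih _ _ _ hl (by omega)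
          have hr2 := ih _ _ _ hr (by omega)
          refine Models.inner s e _ _ _ hse hl2 hr2 ?_
          rw [hl2.val_eq, hr2.val_eq]
          exact (cnt_concat (s + PySem.Int.floordiv (e - s) 2) (by omega) (by omega)).symm


-- ---- the indicator of remaining positions ----

lemma ind_cons (p : Int × Int) (t : List (Int × Int)) (j : Int) :
    ind (p :: t) j = if j = p.2 then 1 else ind t j := by
  by_cases hj : j = p.2
  · simp [ind, hj]
  · unfold ind
    rw [List.map_cons]
    by_cases hm : j ∈ List.map Prod.snd t
    · rw [if_pos (List.mem_cons.mpr (Or.inr hm)), if_pos hm, if_neg hj]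
    · rw [if_neg (fun h => by
        rcases List.mem_cons.mp h with h | h
        · exact hj h
        · exact hm h), if_neg hm, if_neg hj]

lemma ind_nil (j : Int) : ind [] j = 0 := by simp [ind]

lemma cnt_ind_full (n : Int) (l : List (Int × Int)) (hnd : (l.map Prod.snd).Nodup)
    (hb : ∀ p ∈ l, 0 ≤ p.2 ∧ p.2 ≤ n - 1) :
    cnt (ind l) 0 (n - 1) = l.length := by
  induction l with
  | nil => simpa using cnt_zero (fun i _ _ => ind_nil i)
  | cons p t ih =>
    rw [List.map_cons, List.nodup_cons] at hnd
    have hnotin : p.2 ∉ t.map Prod.snd := hnd.1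
    have hind0 : ind t p.2 = 0 := by simp [ind, hnotin]
    have hpt : ∀ j, ind (p :: t) j = ind t j + (if j = p.2 then 1 else 0) := by
      intro j
      rw [ind_cons]
      by_cases hj : j = p.2
      · simp [hj, hind0]
      · simp [hj]
    rw [cnt_congr (g := fun j => ind t j + if j = p.2 then 1 else 0) (fun i _ _ => hpt i),
        cnt_add]
    rw [ih hnd.2 (fun q hq => hb q (List.mem_cons_of_mem _ hq))]
    have hp := hb p (List.mem_cons_self)
    have h1 : cnt (fun j => if j = p.2 then (1 : Int) else 0) 0 (n - 1)
        = cnt (fun j => if j = p.2 then (1 : Int) else 0) 0 (p.2 - 1)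
          + cnt (fun j => if j = p.2 then (1 : Int) else 0) p.2 (n - 1) := by
      have := cnt_concat (f := fun j => if j = p.2 then (1 : Int) else 0)
        (a := 0) (b := n - 1) (p.2 - 1) (by omega) (by omega)
      rw [show p.2 - 1 + 1 = p.2 by ring] at this
      exact this
    have h2 : cnt (fun j => if j = p.2 then (1 : Int) else 0) p.2 (n - 1)
        = cnt (fun j => if j = p.2 then (1 : Int) else 0) p.2 p.2
          + cnt (fun j => if j = p.2 then (1 : Int) else 0) (p.2 + 1) (n - 1) :=
      cnt_concat (a := p.2) (b := n - 1) p.2 (by omega) (by omega)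
    rw [h1, h2, cnt_point, if_pos rfl,
        cnt_zero (f := fun j => if j = p.2 then (1 : Int) else 0)
          (fun i hi1 hi2 => if_neg (by omega)),
        cnt_zero (f := fun j => if j = p.2 then (1 : Int) else 0)
          (fun i hi1 hi2 => if_neg (by omega))]
    simp only [List.length_cons]
    push_cast
    ring

-- ---- B's loop ----

lemma loopB_eq (l : List (Int × Int)) : ∀ (res rem prev : Int),
    (l.foldl stepB (res, rem, prev)).1 = res + bw rem prev l := by
  induction l with
  | nil => intro res rem prev; simp [bw]
  | cons p t ih =>
    intro res rem prev
    rw [List.foldl_cons]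
    show (t.foldl stepB ((if p.2 < prev then res + rem else res), rem - 1, p.2)).1 = _
    rw [ih]
    by_cases h : p.2 < prev
    · simp [bw, h]; ring
    · simp [bw, h]

-- ---- the build loop: point updates 0..j-1 ----

lemma build_inv (n : Int) (hn : 1 ≤ n) (fuel : Nat) (hfuel : (n - 1).toNat < fuel) :
    ∀ (j : Nat), (j : Int) ≤ n →
    Models (fun i => if 0 ≤ i ∧ i < (j : Int) then 1 else 0) 0 (n - 1)
      ((PySem.List.pyRange 0 (j : Int) 1).foldl (fun st i => Seg.update fuel i i 1 st)
        (Seg.node 0 (n - 1) 0 .empty .empty)) := by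
  intro j
  induction j with
  | zero =>
    intro _
    rw [show ((0 : Nat) : Int) = 0 from rfl, PySem.List.pyRange_one_eq_nil (by omega)]
    simp only [List.foldl_nil]
    exact Models.base 0 (n - 1) 0 (by omega)
      (cnt_zero (fun i _ _ => if_neg (by omega))).symm
      (Or.inr (fun i _ _ => if_neg (by omega)))
  | succ j ihj =>
    intro hj
    have hcast : ((j + 1 : Nat) : Int) = (j : Int) + 1 := by push_cast; ring
    rw [hcast, PySem.List.pyRange_one_succ_right (by omega), List.foldl_append]
    simp only [List.foldl_cons, List.foldl_nil]
    have h1 := update_models fuel (fun i => if 0 ≤ i ∧ i < (j : Int) then 1 else 0)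
      (j : Int) 1 0 (n - 1) _ (ihj (by omega)) (by omega)
    exact h1.congr (fun i hi1 hi2 => by beta_reduce; split_ifs <;> omega)


-- ---- A's main loop against B's wrap-sum ----

lemma loopA_eq (fuel : Nat) (n : Int) (hfuel : (n - 1).toNat < fuel) :
    ∀ (l : List (Int × Int)) (st : Seg) (prev res : Int),
      Models (ind l) 0 (n - 1) st →
      (l.map Prod.snd).Nodup →
      (∀ p ∈ l, 0 ≤ p.2 ∧ p.2 ≤ n - 1) →
      0 ≤ prev → prev ≤ n - 1 →
      (l.foldl (stepA fuel n) (st, prev, res)).2.2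
        = res + l.length + bw l.length prev l - cnt (ind l) 0 (prev - 1) := by
  intro l
  induction l with
  | nil =>
    intro st prev res _ _ _ _ _
    simp only [List.foldl_nil, List.length_nil, Nat.cast_zero, bw]
    rw [cnt_zero (fun i _ _ => ind_nil i)]
    ring
  | cons p t ih =>
    intro st prev res hM hnd hb hp0 hp1
    rw [List.map_cons, List.nodup_cons] at hnd
    have hnotin : p.2 ∉ t.map Prod.snd := hnd.1
    have hidx := hb p (List.mem_cons_self)
    have hind0 : ind t p.2 = 0 := by simp [ind, hnotin]
    -- the updated tree models the tail's indicator
    have hupd := update_models fuel (ind (p :: t)) p.2 0 0 (n - 1) st hM (by omega)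
    have hM' : Models (ind t) 0 (n - 1) (Seg.update fuel p.2 p.2 0 st) := by
      refine hupd.congr (fun i hi1 hi2 => ?_)
      beta_reduce
      by_cases hij : i = p.2
      · rw [if_pos hij, hij, hind0]
      · rw [if_neg hij, ind_cons, if_neg hij]
    -- query values on the current tree
    have hq : ∀ qs qe, Seg.query fuel qs qe st = cnt (ind (p :: t)) (max 0 qs) (min (n - 1) qe) :=
      fun qs qe => query_eq fuel _ qs qe 0 (n - 1) st hM (by omega)
    rw [List.foldl_cons]
    rw [show stepA fuel n (st, prev, res) p
        = (Seg.update fuel p.2 p.2 0 st, p.2,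
            (if prev = p.2 then res + 1
             else if prev < p.2 then res + (Seg.query fuel prev (p.2 - 1) st + 1)
             else res + (Seg.query fuel prev (n - 1) st + Seg.query fuel 0 (p.2 - 1) st + 1)))
      from rfl]
    rw [ih _ _ _ hM' hnd.2 (fun q hq' => hb q (List.mem_cons_of_mem _ hq')) (by omega) (by omega)]
    -- arithmetic
    have hcnt_tail : ∀ b : Int, b ≤ p.2 - 1 → cnt (ind t) 0 b = cnt (ind (p :: t)) 0 b :=
      fun b hbb => cnt_congr (fun i hi1 hi2 => by rw [ind_cons, if_neg (by omega)])
    simp only [bw, List.length_cons]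
    rw [show ((t.length + 1 : Nat) : Int) - 1 = (t.length : Int) by push_cast; ring]
    by_cases h1 : prev = p.2
    · rw [if_pos h1, if_neg (show ¬ p.2 < prev by omega)]
      rw [hcnt_tail (p.2 - 1) (by omega), h1]
      push_cast
      ring
    · rw [if_neg h1]
      by_cases h2 : prev < p.2
      · rw [if_pos h2, if_neg (show ¬ p.2 < prev by omega), hq]
        rw [show max 0 prev = prev by omega, show min (n - 1) (p.2 - 1) = p.2 - 1 by omega]
        have hsplit := cnt_concat (f := ind (p :: t)) (a := 0) (b := p.2 - 1) (prev - 1)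
          (by omega) (by omega)
        rw [show prev - 1 + 1 = prev by ring] at hsplit
        rw [hcnt_tail (p.2 - 1) (by omega)]
        rw [hsplit]
        push_cast
        ring
      · rw [if_neg h2, if_pos (show p.2 < prev by omega), hq, hq]
        rw [show max 0 prev = prev by omega, show min (n - 1) (n - 1) = n - 1 by omega,
            show max (0:Int) 0 = 0 by omega, show min (n - 1) (p.2 - 1) = p.2 - 1 by omega]
        have hfull : cnt (ind (p :: t)) 0 (n - 1) = (p :: t).length :=
          cnt_ind_full n (p :: t) (by rw [List.map_cons, List.nodup_cons]; exact ⟨hnotin, hnd.2⟩) hb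
        have hsplit := cnt_concat (f := ind (p :: t)) (a := 0) (b := n - 1) (prev - 1)
          (by omega) (by omega)
        rw [show prev - 1 + 1 = prev by ring] at hsplit
        rw [hcnt_tail (p.2 - 1) (by omega)]
        have : cnt (ind (p :: t)) prev (n - 1)
            = ((p :: t).length : Int) - cnt (ind (p :: t)) 0 (prev - 1) := by
          rw [← hfull, hsplit]; ring
        rw [this]
        simp only [List.length_cons]
        push_cast
        ring


lemma main_nonempty (L : List Int) (hL : 1 ≤ L.length) :
    countOperationsToEmptyArray L = countOperationsToEmptyArray_alt L := by
  simp only [countOperationsToEmptyArray, countOperationsToEmptyArray_alt]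
  set nI : Int := (L.length : Int) with hnI
  set pairs := PySem.List.sorted2 ((PySem.List.enumerate L).map (fun p => (p.2, p.1)))
    Prod.fst Prod.snd false with hpairs
  set fuel := L.length + 1 with hfuel
  have hperm : pairs.Perm ((PySem.List.enumerate L).map (fun p => (p.2, p.1))) :=
    PySem.List.sorted2_perm _ _ _ _
  have hsndp : (pairs.map Prod.snd).Perm (PySem.List.pyRange 0 nI 1) := by
    have h1 := hperm.map Prod.snd
    rw [List.map_map] at h1
    have h2 : (PySem.List.enumerate L).map (Prod.snd ∘ fun p => (p.2, p.1))
        = (PySem.List.enumerate L).map (·.1) := rfl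
    rw [h2, PySem.List.map_fst_enumerate] at h1
    simpa using h1
  have hnodup : (pairs.map Prod.snd).Nodup :=
    hsndp.nodup_iff.mpr (PySem.List.nodup_pyRange_one 0 nI)
  have hbounds : ∀ p ∈ pairs, 0 ≤ p.2 ∧ p.2 ≤ nI - 1 := by
    intro p hp
    have hm : p.2 ∈ pairs.map Prod.snd := List.mem_map_of_mem hp
    have := (hsndp.mem_iff).mp hm
    rw [PySem.List.mem_pyRange_one] at this
    omega
  have hplen : (pairs.length : Int) = nI := by
    rw [hperm.length_eq, List.length_map, PySem.List.length_enumerate]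
  have hfuelok : (nI - 1).toNat < fuel := by omega
  have hMfull : Models (ind pairs) 0 (nI - 1)
      ((PySem.List.pyRange 0 nI 1).foldl (fun st i => Seg.update fuel i i 1 st)
        (Seg.node 0 (nI - 1) 0 .empty .empty)) := by
    have hb := build_inv nI (by omega) fuel hfuelok L.length (by omega)
    rw [← hnI] at hb
    refine hb.congr (fun i hi1 hi2 => ?_)
    beta_reduce
    rw [if_pos (show 0 ≤ i ∧ i < nI by omega)]
    unfold ind
    rw [if_pos ((hsndp.mem_iff).mpr (PySem.List.mem_pyRange_one.mpr ⟨by omega, by omega⟩))]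
  have hA := loopA_eq fuel nI hfuelok pairs _ 0 0 hMfull hnodup hbounds (by omega) (by omega)
  have hB := loopB_eq pairs nI nI 0
  rw [hA, hB]
  rw [cnt_empty (f := ind pairs) (a := 0) (b := 0 - 1) (by omega)]
  rw [hplen]
  ring


-- ===== VERDICT (by name: the statement is the Claim_ definition above) =====
theorem countOperationsToEmptyArray_spec : Claim_equal_countOperationsToEmptyArray := by
  intro nums _
  unfold Spec_countOperationsToEmptyArray
  cases nums with
  | nil => rfl
  | cons x xs => exact main_nonempty (x :: xs) (by simp)
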